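-- pv_equiv track=rewrite | github.com/lyc-aon/successor-agent | src/successor/render/braille.py | pack_dots
-- ===== SOURCE A (Python) =====
-- BRAILLE_BASE = 0x2800
--
-- def bits_to_braille(bits: int) -> str:
--     """Convert an 8-bit dot pattern to its braille character."""
--     return chr(BRAILLE_BASE + (bits & 0xFF))
--
-- DOT_AT: tuple[tuple[int, int], ...] = (
--     (0x01, 0x08),  # row 0: dot 1, dot 4
--     (0x02, 0x10),  # row 1: dot 2, dot 5
--     (0x04, 0x20),  # row 2: dot 3, dot 6
--     (0x40, 0x80),  # row 3: dot 7, dot 8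
-- )
--
-- def pack_dots(dots: list[list[bool]]) -> list[str]:
--     """Pack a 2D dot bitmap back into braille characters.
--
--     The bitmap dimensions don't need to be aligned to (4, 2); any partial
--     cell at the right or bottom edge is treated as having empty dots
--     in the unfilled positions.
--     """
--     if not dots or not dots[0]:
--         return []
--     h = len(dots)
--     w = len(dots[0])
--     cell_rows = (h + 3) // 4
--     cell_cols = (w + 1) // 2
--     out: list[str] = []
--     for cy in range(cell_rows):
--         chars: list[str] = []
--         for cx in range(cell_cols):
--             bits = 0
--             for sr in range(4):
--                 py = cy * 4 + sr
--                 if py >= h: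
--                     continue
--                 row = dots[py]
--                 px_l = cx * 2
--                 px_r = px_l + 1
--                 if px_l < w and row[px_l]:
--                     bits |= DOT_AT[sr][0]
--                 if px_r < w and row[px_r]:
--                     bits |= DOT_AT[sr][1]
--             chars.append(bits_to_braille(bits))
--         out.append("".join(chars))
--     return out
-- ===== SOURCE B (Python) =====
-- BRAILLE_BASE = 0x2800
--
-- DOT_AT = (
--     (0x01, 0x08),
--     (0x02, 0x10),
--     (0x04, 0x20),
--     (0x40, 0x80),
-- )
--
-- def pack_dots(dots: list[list[bool]]) -> list[str]:
--     """Pack a 2D dot bitmap into braille characters (scatter pass).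
--
--     One pass over the input pixels scatters each set dot into an
--     accumulator grid of cell bit-patterns, rendered at the end.
--     """
--     if not dots or not dots[0]:
--         return []
--     h = len(dots)
--     w = len(dots[0])
--     cell_rows = (h + 3) // 4
--     cell_cols = (w + 1) // 2
--     cells = [[0] * cell_cols for _ in range(cell_rows)]
--     for py in range(h):
--         row = dots[py]
--         cy, sr = divmod(py, 4)
--         acc = cells[cy]
--         for px in range(w):
--             if row[px]:
--                 acc[px // 2] |= DOT_AT[sr][px % 2]
--     return ["".join(chr(BRAILLE_BASE + b) for b in r) for r in cells]
-- ===== Notes on version B (the rewrite author's own statement) =====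
-- stated objective: alternative
-- what changed: A gathers each output cell with a triple loop over cell rows, cell columns and sub-rows reading up to 8 pixels per cell; B makes one scatter pass over the input pixels, OR-ing each set dot into an accumulator grid of cell bit-patterns that is rendered at the end.
import Mathlib
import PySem

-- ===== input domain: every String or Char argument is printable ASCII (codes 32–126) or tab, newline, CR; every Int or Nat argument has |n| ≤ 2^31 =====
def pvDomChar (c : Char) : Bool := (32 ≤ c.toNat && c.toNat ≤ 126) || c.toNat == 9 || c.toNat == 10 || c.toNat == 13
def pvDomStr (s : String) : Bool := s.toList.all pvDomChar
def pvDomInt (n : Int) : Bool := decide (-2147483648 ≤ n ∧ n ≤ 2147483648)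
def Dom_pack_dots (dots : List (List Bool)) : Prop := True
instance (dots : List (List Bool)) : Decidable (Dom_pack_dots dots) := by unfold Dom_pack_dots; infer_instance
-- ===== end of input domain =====

-- B replaces A's per-cell gather (triple loop over output cells) by a single scatter
-- pass over the input pixels into an accumulator grid; objective: alternative decomposition.

-- ===== PORT A =====
-- DOT_AT table lookup
def dotAt (sr sc : Nat) : Nat :=
  (([[1, 8], [2, 16], [4, 32], [64, 128]] : List (List Nat)).getD sr []).getD sc 0

def pack_dots (dots : List (List Bool)) : List String :=
  match dots with
  | [] => []
  | r0 :: _ =>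
    if r0.isEmpty then []
    else
      let h := dots.length
      let w := r0.length
      let cellRows := (h + 3) / 4
      let cellCols := (w + 1) / 2
      (List.range cellRows).map (fun cy =>
        String.mk ((List.range cellCols).map (fun cx =>
          let bits := (List.range 4).foldl (fun bits sr =>
            let py := cy * 4 + sr
            if h ≤ py then bits
            else
              let row := dots.getD py []
              let pxl := cx * 2
              let pxr := pxl + 1
              let bits := if pxl < w ∧ row.getD pxl false then bits ||| dotAt sr 0 else bits
              if pxr < w ∧ row.getD pxr false then bits ||| dotAt sr 1 else bits) 0
          Char.ofNat (0x2800 + (bits &&& 0xFF)))))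

-- ===== PORT B =====
def pack_dots_alt (dots : List (List Bool)) : List String :=
  match dots with
  | [] => []
  | r0 :: _ =>
    if r0.isEmpty then []
    else
      let h := dots.length
      let w := r0.length
      let cellRows := (h + 3) / 4
      let cellCols := (w + 1) / 2
      let init : List (List Nat) := (List.range cellRows).map (fun _ => List.replicate cellCols 0)
      let cells := (List.range h).foldl (fun cells py =>
        let row := dots.getD py []
        let cy := py / 4
        let sr := py % 4
        (List.range w).foldl (fun cells px =>
          if row.getD px false then
            cells.modify cy (fun r => r.modify (px / 2) (fun b => b ||| dotAt sr (px % 2)))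
          else cells) cells) init
      cells.map (fun r => String.mk (r.map (fun b => Char.ofNat (0x2800 + (b &&& 0xFF)))))

-- ===== PRECONDITION & SPEC =====
-- Pre_ excludes ragged bitmaps with a row shorter than the first row, on which the
-- Python A (and B) raises IndexError when indexing row[px] for px < len(dots[0]).
def Pre_pack_dots (dots : List (List Bool)) : Prop :=
  ∀ row ∈ dots, (dots.headD []).length ≤ row.length
instance (dots : List (List Bool)) : Decidable (Pre_pack_dots dots) := by unfold Pre_pack_dots; infer_instance

def pvWitness_pack_dots : List (List Bool) := [[true, false, true], [false, true, true]]

def Spec_pack_dots (dots : List (List Bool)) (out : List String) : Prop := out = pack_dots_alt dots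
instance (dots : List (List Bool)) (out : List String) : Decidable (Spec_pack_dots dots out) := by unfold Spec_pack_dots; infer_instance

-- ===== CLAIM (what is proved, stated in full; the proofs are below) =====
def Claim_equal_pack_dots : Prop := ∀ (dots : List (List Bool)), Dom_pack_dots dots → Pre_pack_dots dots → Spec_pack_dots dots (pack_dots dots)

-- ===== LEMMAS AND PROOFS =====

-- contribution of the two pixels of cell column cx within the first n pixels of a band row
def prRow (row : List Bool) (sr n cx : Nat) : Nat :=
  (if cx * 2 < n ∧ row.getD (cx * 2) false then dotAt sr 0 else 0) |||
  (if cx * 2 + 1 < n ∧ row.getD (cx * 2 + 1) false then dotAt sr 1 else 0)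

-- contribution of band row sr of cell row cy to cell (cy, cx)
def contrib (dots : List (List Bool)) (w cy cx sr : Nat) : Nat :=
  prRow (dots.getD (cy * 4 + sr) []) sr w cx

def gtM (dots : List (List Bool)) (w m cy cx sr : Nat) : Nat :=
  if cy * 4 + sr < m then contrib dots w cy cx sr else 0

-- bits of cell (cy, cx) once the first m bitmap rows are in
def cellValM (dots : List (List Bool)) (w m cy cx : Nat) : Nat :=
  gtM dots w m cy cx 0 ||| gtM dots w m cy cx 1 ||| gtM dots w m cy cx 2 ||| gtM dots w m cy cx 3

def ent (g : List (List Nat)) (i j : Nat) : Nat := (g.getD i []).getD j 0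

def Shape (g : List (List Nat)) (R C : Nat) : Prop :=
  g.length = R ∧ ∀ i, i < R → (g.getD i []).length = C

theorem getD_modify {α : Type} (l : List α) (i j : Nat) (f : α → α) (d : α) :
    (l.modify i f).getD j d = if i = j ∧ j < l.length then f (l.getD j d) else l.getD j d := by
  by_cases hj : j < l.length
  · by_cases hij : i = j
    · subst hij
      simp [List.getD, hj]
    · simp [List.getD, hij, hj]
  · simp [List.getD, hj]

-- A's inner fold body ORs gtM onto the accumulator
theorem bodyA_eq (dots : List (List Bool)) (h w cy cx bits sr : Nat) :
    (let py := cy * 4 + sr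
     if h ≤ py then bits
     else
       let row := dots.getD py []
       let pxl := cx * 2
       let pxr := pxl + 1
       let bits := if pxl < w ∧ row.getD pxl false then bits ||| dotAt sr 0 else bits
       if pxr < w ∧ row.getD pxr false then bits ||| dotAt sr 1 else bits)
    = bits ||| gtM dots w h cy cx sr := by
  simp only [gtM, contrib, prRow]
  split_ifs <;> simp_all [Nat.or_assoc] <;> omega

theorem foldA_eq (dots : List (List Bool)) (h w cy cx : Nat) :
    ((List.range 4).foldl (fun bits sr =>
      let py := cy * 4 + sr
      if h ≤ py then bits
      else
        let row := dots.getD py []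
        let pxl := cx * 2
        let pxr := pxl + 1
        let bits := if pxl < w ∧ row.getD pxl false then bits ||| dotAt sr 0 else bits
        if pxr < w ∧ row.getD pxr false then bits ||| dotAt sr 1 else bits) 0)
    = cellValM dots w h cy cx := by
  rw [show List.range 4 = [0, 1, 2, 3] from rfl]
  simp only [List.foldl]
  rw [bodyA_eq, bodyA_eq, bodyA_eq, bodyA_eq]
  simp [cellValM]

theorem cond_shift (j n : Nat) (P : Bool) (hP : j = n → P = false) :
    (j < n + 1 ∧ P = true) ↔ (j < n ∧ P = true) := by
  constructor
  · rintro ⟨h1, h2⟩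
    refine ⟨?_, h2⟩
    by_cases e : j = n
    · rw [hP e] at h2; cases h2
    · omega
  · rintro ⟨h1, h2⟩; exact ⟨by omega, h2⟩

theorem prRow_succ (row : List Bool) (sr n cx : Nat) :
    prRow row sr (n + 1) cx =
      if cx * 2 = n ∧ row.getD n false then prRow row sr n cx ||| dotAt sr 0
      else if cx * 2 + 1 = n ∧ row.getD n false then prRow row sr n cx ||| dotAt sr 1
      else prRow row sr n cx := by
  by_cases hb : row.getD n false = true
  · by_cases e1 : cx * 2 = n
    · rw [if_pos ⟨e1, hb⟩]
      unfold prRow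
      rw [if_pos ⟨by omega, by rw [e1]; exact hb⟩, if_neg (by rintro ⟨h, -⟩; omega),
        if_neg (by rintro ⟨h, -⟩; omega), if_neg (by rintro ⟨h, -⟩; omega)]
      simp
    · by_cases e2 : cx * 2 + 1 = n
      · rw [if_neg (by rintro ⟨h, -⟩; exact e1 h), if_pos ⟨e2, hb⟩]
        unfold prRow
        simp only [show cx * 2 < n + 1 ↔ cx * 2 < n from by omega]
        rw [if_pos (show cx * 2 + 1 < n + 1 ∧ row.getD (cx * 2 + 1) false = true from
              ⟨by omega, by rw [e2]; exact hb⟩),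
          if_neg (show ¬(cx * 2 + 1 < n ∧ row.getD (cx * 2 + 1) false = true) from
              by rintro ⟨h, -⟩; omega)]
        simp
      · rw [if_neg (by rintro ⟨h, -⟩; exact e1 h), if_neg (by rintro ⟨h, -⟩; exact e2 h)]
        unfold prRow
        simp only [show cx * 2 < n + 1 ↔ cx * 2 < n by omega,
          show cx * 2 + 1 < n + 1 ↔ cx * 2 + 1 < n by omega]
  · have hb' : row.getD n false = false := by revert hb; cases row.getD n false <;> simp
    rw [if_neg (by rintro ⟨-, h⟩; exact hb h), if_neg (by rintro ⟨-, h⟩; exact hb h)]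
    unfold prRow
    simp only [cond_shift (cx * 2) n (row.getD (cx * 2) false) (fun e => e ▸ hb'),
      cond_shift (cx * 2 + 1) n (row.getD (cx * 2 + 1) false) (fun e => e ▸ hb')]

theorem cellValM_succ (dots : List (List Bool)) (w m cy cx : Nat) :
    cellValM dots w (m + 1) cy cx =
      if cy = m / 4 then cellValM dots w m cy cx ||| prRow (dots.getD m []) (m % 4) w cx
      else cellValM dots w m cy cx := by
  have hgs : ∀ sr, gtM dots w (m + 1) cy cx sr
      = gtM dots w m cy cx sr ||| (if cy * 4 + sr = m then contrib dots w cy cx sr else 0) := by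
    intro sr
    unfold gtM
    split_ifs <;> simp_all <;> omega
  simp only [cellValM, hgs]
  by_cases hc : cy = m / 4
  · rw [if_pos hc]
    have h4 : m % 4 = 0 ∨ m % 4 = 1 ∨ m % 4 = 2 ∨ m % 4 = 3 := by omega
    rcases h4 with h4 | h4 | h4 | h4 <;> rw [h4] <;>
      [rw [if_pos (by omega), if_neg (by omega), if_neg (by omega), if_neg (by omega),
        show contrib dots w cy cx 0 = prRow (dots.getD m []) 0 w cx by
          unfold contrib; rw [show cy * 4 + 0 = m by omega]];
       rw [if_neg (by omega), if_pos (by omega), if_neg (by omega), if_neg (by omega),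
        show contrib dots w cy cx 1 = prRow (dots.getD m []) 1 w cx by
          unfold contrib; rw [show cy * 4 + 1 = m by omega]];
       rw [if_neg (by omega), if_neg (by omega), if_pos (by omega), if_neg (by omega),
        show contrib dots w cy cx 2 = prRow (dots.getD m []) 2 w cx by
          unfold contrib; rw [show cy * 4 + 2 = m by omega]];
       rw [if_neg (by omega), if_neg (by omega), if_neg (by omega), if_pos (by omega),
        show contrib dots w cy cx 3 = prRow (dots.getD m []) 3 w cx by
          unfold contrib; rw [show cy * 4 + 3 = m by omega]]] <;>
      simp [Nat.or_assoc, Nat.or_comm, Nat.or_left_comm]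
  · rw [if_neg hc, if_neg (by omega), if_neg (by omega), if_neg (by omega), if_neg (by omega)]
    simp

theorem ent_modify (g : List (List Nat)) (cy : Nat) (k : Nat) (f : Nat → Nat) (i j : Nat) :
    ent (g.modify cy (fun r => r.modify k f)) i j =
      if cy = i ∧ i < g.length ∧ k = j ∧ j < (g.getD i []).length then f (ent g i j)
      else ent g i j := by
  unfold ent
  rw [getD_modify]
  by_cases h1 : cy = i ∧ i < g.length
  · rw [if_pos h1, getD_modify]
    by_cases h2 : k = j ∧ j < (g.getD i []).length
    · rw [if_pos h2, if_pos ⟨h1.1, h1.2, h2.1, h2.2⟩]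
    · rw [if_neg h2, if_neg (by rintro ⟨-, -, c, d⟩; exact h2 ⟨c, d⟩)]
  · rw [if_neg h1, if_neg (by rintro ⟨a, b, -⟩; exact h1 ⟨a, b⟩)]

-- scatter of one bitmap row: effect on every grid entry
theorem scatterRow (row : List Bool) (sr cy R C : Nat)
    (n : Nat) (g : List (List Nat)) (hg : Shape g R C) (hcy : cy < R)
    (hn : ∀ px, px < n → px / 2 < C) :
    Shape ((List.range n).foldl (fun cells px =>
        if row.getD px false then
          cells.modify cy (fun r => r.modify (px / 2) (fun b => b ||| dotAt sr (px % 2)))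
        else cells) g) R C ∧
    ∀ cy' cx', ent ((List.range n).foldl (fun cells px =>
        if row.getD px false then
          cells.modify cy (fun r => r.modify (px / 2) (fun b => b ||| dotAt sr (px % 2)))
        else cells) g) cy' cx'
      = ent g cy' cx' ||| (if cy' = cy then prRow row sr n cx' else 0) := by
  obtain ⟨hlen0, hrows0⟩ := hg
  revert hn
  induction n with
  | zero =>
    intro hn
    refine ⟨⟨hlen0, hrows0⟩, fun cy' cx' => ?_⟩
    simp [prRow]
  | succ n ih =>
    intro hn
    obtain ⟨⟨hlen, hrows⟩, hent⟩ := ih (fun px hp => hn px (by omega))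
    rw [List.range_succ, List.foldl_append, List.foldl_cons, List.foldl_nil]
    by_cases hb : row.getD n false = true
    · rw [if_pos hb]
      refine ⟨⟨?_, ?_⟩, ?_⟩
      · rw [List.length_modify]; exact hlen
      · intro i hi
        rw [getD_modify]
        split_ifs with hcond
        · rw [List.length_modify]; exact hrows i hi
        · exact hrows i hi
      · intro cy' cx'
        simp only [ent_modify]
        by_cases hcc : cy = cy'
        · subst hcc
          by_cases hx : n / 2 = cx'
          · rw [if_pos ⟨rfl, by omega, hx, by have h1 := hrows cy hcy; have h2 := hn n (by omega); omega⟩,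
              hent cy cx', prRow_succ]
            rcases (show n % 2 = 0 ∨ n % 2 = 1 from by omega) with h2 | h2 <;> rw [h2]
            · rw [if_pos (show cx' * 2 = n ∧ row.getD n false = true from ⟨by omega, hb⟩)]
              simp [Nat.or_assoc]
            · rw [if_neg (show ¬(cx' * 2 = n ∧ row.getD n false = true) from
                    by rintro ⟨hq, -⟩; omega),
                if_pos (show cx' * 2 + 1 = n ∧ row.getD n false = true from ⟨by omega, hb⟩)]
              simp [Nat.or_assoc]
          · rw [if_neg (by rintro ⟨-, -, hq, -⟩; exact hx hq), hent cy cx', prRow_succ,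
              if_neg (show ¬(cx' * 2 = n ∧ row.getD n false = true) from
                  by rintro ⟨hq, -⟩; omega),
              if_neg (show ¬(cx' * 2 + 1 = n ∧ row.getD n false = true) from
                  by rintro ⟨hq, -⟩; omega)]
        · rw [if_neg (by rintro ⟨hq, -⟩; exact hcc hq), hent cy' cx', prRow_succ,
            if_neg (show ¬(cy' = cy) from by intro hq; exact hcc hq.symm),
            if_neg (show ¬(cy' = cy) from by intro hq; exact hcc hq.symm)]
    · rw [if_neg hb]
      refine ⟨⟨hlen, hrows⟩, fun cy' cx' => ?_⟩
      rw [hent cy' cx', prRow_succ,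
        if_neg (show ¬(cx' * 2 = n ∧ row.getD n false = true) from
            by rintro ⟨-, hq⟩; exact hb hq),
        if_neg (show ¬(cx' * 2 + 1 = n ∧ row.getD n false = true) from
            by rintro ⟨-, hq⟩; exact hb hq)]

-- scatter of the first m bitmap rows
theorem scatterAll (dots : List (List Bool)) (h w : Nat) (hh : h = dots.length)
    (m : Nat) (hm : m ≤ h) (g : List (List Nat))
    (hg : Shape g ((h + 3) / 4) ((w + 1) / 2)) :
    Shape ((List.range m).foldl (fun cells py =>
        let row := dots.getD py []
        let cy := py / 4
        let sr := py % 4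
        (List.range w).foldl (fun cells px =>
          if row.getD px false then
            cells.modify cy (fun r => r.modify (px / 2) (fun b => b ||| dotAt sr (px % 2)))
          else cells) cells) g) ((h + 3) / 4) ((w + 1) / 2) ∧
    ∀ cy' cx', ent ((List.range m).foldl (fun cells py =>
        let row := dots.getD py []
        let cy := py / 4
        let sr := py % 4
        (List.range w).foldl (fun cells px =>
          if row.getD px false then
            cells.modify cy (fun r => r.modify (px / 2) (fun b => b ||| dotAt sr (px % 2)))
          else cells) cells) g) cy' cx'
      = ent g cy' cx' ||| cellValM dots w m cy' cx' := by
  revert hm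
  induction m with
  | zero =>
    intro hm
    refine ⟨hg, fun cy' cx' => ?_⟩
    simp [cellValM, gtM]
  | succ m ih =>
    intro hm
    obtain ⟨hsh, hent⟩ := ih (by omega)
    have hrow := scatterRow (dots.getD m []) (m % 4) (m / 4) ((h + 3) / 4) ((w + 1) / 2) w
      ((List.range m).foldl (fun cells py =>
        let row := dots.getD py []
        let cy := py / 4
        let sr := py % 4
        (List.range w).foldl (fun cells px =>
          if row.getD px false then
            cells.modify cy (fun r => r.modify (px / 2) (fun b => b ||| dotAt sr (px % 2)))
          else cells) cells) g)
      hsh (by omega) (fun px hp => by omega)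
    obtain ⟨hsh', hent'⟩ := hrow
    rw [List.range_succ, List.foldl_append, List.foldl_cons, List.foldl_nil]
    refine ⟨hsh', fun cy' cx' => ?_⟩
    refine (hent' cy' cx').trans ?_
    rw [hent cy' cx', cellValM_succ, Nat.or_assoc]
    congr 1
    split_ifs <;> simp

theorem shape_init (R C : Nat) :
    Shape ((List.range R).map (fun _ => List.replicate C 0)) R C := by
  refine ⟨by simp, fun i hi => ?_⟩
  rw [List.getD_eq_getElem _ _ (by simpa using hi), List.getElem_map]
  simp

theorem ent_init (R C i j : Nat) :
    ent ((List.range R).map (fun _ => List.replicate C 0)) i j = 0 := by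
  unfold ent
  by_cases hi : i < R
  · have h1 : ((List.range R).map (fun _ => List.replicate C (0 : Nat))).getD i []
        = List.replicate C 0 := by
      rw [List.getD_eq_getElem _ _ (by simpa using hi), List.getElem_map]
    rw [h1]
    by_cases hj : j < C
    · rw [List.getD_eq_getElem _ _ (by simpa using hj), List.getElem_replicate]
    · simp [List.getD, List.getElem?_eq_none
        (show (List.replicate C (0 : Nat)).length ≤ j by simp; omega)]
  · have h1 : ((List.range R).map (fun _ => List.replicate C (0 : Nat))).getD i [] = [] := by
      rw [List.getD_eq_getElem?_getD, List.getElem?_eq_none (by simp; omega)]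
      rfl
    rw [h1]
    rfl

-- assembling the rendered output from the grid entries
theorem render_eq (cells : List (List Nat)) (dots : List (List Bool)) (h w : Nat)
    (hlen : cells.length = (h + 3) / 4)
    (hrows : ∀ i, i < (h + 3) / 4 → (cells.getD i []).length = (w + 1) / 2)
    (hent : ∀ cy cx, ent cells cy cx = cellValM dots w h cy cx) :
    (List.range ((h + 3) / 4)).map (fun cy =>
        String.mk ((List.range ((w + 1) / 2)).map (fun cx =>
          Char.ofNat (0x2800 + (cellValM dots w h cy cx &&& 0xFF)))))
      = cells.map (fun r => String.mk (r.map (fun b => Char.ofNat (0x2800 + (b &&& 0xFF))))) := by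
  refine List.ext_getElem (by simp [hlen]) ?_
  intro cy h1 h2
  have hcyR : cy < (h + 3) / 4 := by simpa using h1
  have hcyL : cy < cells.length := by omega
  simp only [List.getElem_map, List.getElem_range]
  refine congrArg String.mk ?_
  have hrl : cells[cy].length = (w + 1) / 2 := by
    rw [← List.getD_eq_getElem _ [] hcyL]; exact hrows cy hcyR
  refine List.ext_getElem (by simp [hrl]) ?_
  intro cx hc1 hc2
  simp only [List.getElem_map, List.getElem_range]
  refine congrArg (fun b => Char.ofNat (0x2800 + (b &&& 0xFF))) ?_
  have e := hent cy cx
  unfold ent at e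
  rw [List.getD_eq_getElem _ [] hcyL,
    List.getD_eq_getElem _ 0 (by rw [hrl]; simpa using hc1)] at e
  exact e.symm

-- ===== VERDICT (by name: the statement is the Claim_ definition above) =====
theorem pack_dots_spec : Claim_equal_pack_dots := by
  intro dots _ _
  unfold Spec_pack_dots
  cases dots with
  | nil => rfl
  | cons r0 rest =>
    simp only [pack_dots, pack_dots_alt]
    by_cases he : r0.isEmpty = true
    · rw [if_pos he, if_pos he]
    · rw [if_neg he, if_neg he]
      obtain ⟨⟨hlen, hrows⟩, hent⟩ :=
        scatterAll (r0 :: rest) (r0 :: rest).length r0.length rfl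
          (r0 :: rest).length le_rfl
          ((List.range (((r0 :: rest).length + 3) / 4)).map
            (fun _ => List.replicate ((r0.length + 1) / 2) 0))
          (shape_init (((r0 :: rest).length + 3) / 4) ((r0.length + 1) / 2))
      simp only [foldA_eq]
      refine render_eq _ (r0 :: rest) (r0 :: rest).length r0.length hlen hrows
        (fun cy cx => ?_)
      rw [hent cy cx, ent_init, Nat.zero_or]
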